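-- pv_equiv track=rewrite | github.com/tkong9/ACSL-Sr | Past_Exams/43/triangle2.py | solve
-- ===== SOURCE A (Python) =====
-- def triangle(s, d, r, memo):
--     if memo[r] is not None:  # If the result is already computed, use it
--         return memo[r]
--
--     # base case
--     if r == 1:
--         memo[r] = s  # Save the result in memo list
--         return s
--
--     # recursive case
--     result = triangle(s, d, r - 1, memo) + d * (r - 1)
--     memo[r] = result  # Save the computed result in the memo list
--     return result
--
-- def decimal_to_octal(n):
--     """Convert a decimal number to its octal representation as a string."""
--     return oct(n)[2:]
--
-- def sum_of_digits(n):
--     """Return the sum of digits of a given number."""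
--     return sum(map(int, str(n)))
--
-- def solve(s, d, r):
--     """Solve the problem by calculating the sum of digits on the r-th row."""
--     memo = [None] * (r + 1)  # Create a memo list with None values, size r+1
--     first_num_of_last_row = triangle(s, d, r, memo)
--
--     sum_of_last_row = 0
--     for i in range(r):
--         octal = decimal_to_octal(first_num_of_last_row)
--         sum_of_last_row += sum_of_digits(octal)
--         first_num_of_last_row += d  # Move to the next number in the row
--
--     return sum_of_last_row
-- ===== SOURCE B (Python) =====
-- def solve(s, d, r):
--     """Closed form for the first element of row r, then sum octal digit
--     sums by repeated divmod-by-8 (no recursion, no memo, no strings)."""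
--     start = s + d * (r * (r - 1) // 2)
--     total = 0
--     for i in range(r):
--         n = start + d * i
--         while n > 0:
--             total += n % 8
--             n //= 8
--     return total
-- ===== Notes on version B (the rewrite author's own statement) =====
-- stated objective: simpler
-- what changed: Replaces the depth-r memoized recursion for the row's first element with the closed form s + d*r*(r-1)//2, and replaces the oct()-string/str/int digit machinery with a plain divmod-by-8 accumulation loop.
import Mathlib
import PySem

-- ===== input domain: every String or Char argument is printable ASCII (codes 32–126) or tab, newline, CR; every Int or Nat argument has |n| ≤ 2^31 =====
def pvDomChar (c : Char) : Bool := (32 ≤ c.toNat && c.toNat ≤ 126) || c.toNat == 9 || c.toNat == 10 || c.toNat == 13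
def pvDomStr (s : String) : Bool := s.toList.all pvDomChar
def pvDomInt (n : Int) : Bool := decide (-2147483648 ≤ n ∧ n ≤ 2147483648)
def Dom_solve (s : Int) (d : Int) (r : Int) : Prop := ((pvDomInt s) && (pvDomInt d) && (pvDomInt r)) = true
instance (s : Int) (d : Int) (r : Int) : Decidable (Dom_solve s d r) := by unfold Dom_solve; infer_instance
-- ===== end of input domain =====

-- B replaces A's memoized depth-r recursion and oct-string digit machinery with the
-- closed form s + d*r*(r-1)//2 and a divmod-by-8 digit-sum loop (objective: simpler).

-- ===== PORT A =====
-- triangle(s, d, r, memo); fuel counts remaining unfoldings (r.toNat suffices on Pre_).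
def pyTriangle (s d : Int) : Int → List (Option Int) → Nat → Int × List (Option Int)
  | _, memo, 0 => (0, memo)   -- fuel exhausted: unreachable for 1 ≤ r with fuel = r.toNat
  | r, memo, Nat.succ fuel =>
      match PySem.List.pyGet? memo r with
      | some (some v) => (v, memo)          -- memo[r] is not None
      | _ =>
        if r = 1 then (s, PySem.List.pySetD memo r (some s))
        else
          let p := pyTriangle s d (r - 1) memo fuel
          let result := p.1 + d * (r - 1)
          (result, PySem.List.pySetD p.2 r (some result))

-- hand port of decimal_to_octal: oct(n)[2:] as the list of octal digit VALUES, msd first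
-- (exact for 0 ≤ n, which Pre_ guarantees; int(c) of a digit char is its value, so
-- sum_of_digits(octal) is the sum of this list); fuel n.toNat only makes the recursion structural
def pyOctDigitsF : Nat → Int → List Int
  | 0, n => [n]
  | fuel + 1, n =>
      if n < 8 then [n]
      else pyOctDigitsF fuel (PySem.Int.floordiv n 8) ++ [PySem.Int.mod n 8]

def pyOctDigits (n : Int) : List Int := pyOctDigitsF n.toNat n

def solve (s : Int) (d : Int) (r : Int) : Int :=
  let memo : List (Option Int) := List.replicate (r + 1).toNat none
  let first := (pyTriangle s d r memo r.toNat).1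
  -- for i in range(r): sum += sum_of_digits(decimal_to_octal(first)); first += d
  let st := (PySem.List.pyRange 0 r 1).foldl
      (fun (st : Int × Int) _ => (st.1 + d, st.2 + (pyOctDigits st.1).sum))
      (first, 0)
  st.2

-- ===== PORT B =====
-- while n > 0: total += n % 8; n //= 8   (fuel n.toNat only makes the loop structural)
def octSumLoopF : Nat → Int → Int → Int
  | 0, _, total => total
  | fuel + 1, n, total =>
      if 0 < n then octSumLoopF fuel (PySem.Int.floordiv n 8) (total + PySem.Int.mod n 8)
      else total

def octSumLoop (n : Int) (total : Int) : Int := octSumLoopF n.toNat n total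

def solve_alt (s : Int) (d : Int) (r : Int) : Int :=
  let start := s + d * (PySem.Int.floordiv (r * (r - 1)) 2)
  (PySem.List.pyRange 0 r 1).foldl (fun total i => octSumLoop (start + d * i) total) 0

-- ===== PRECONDITION & SPEC =====
-- Pre_ excludes exactly the inputs on which A raises: r ≤ 0 (IndexError/RecursionError in
-- triangle) and rows containing a negative number (oct(n) of negative n makes int() raise
-- ValueError). The row is the arithmetic progression start + d*i, i < r, with
-- start = s + d*r*(r-1)/2, so nonnegativity of both endpoints is nonnegativity of the row.
def Pre_solve (s : Int) (d : Int) (r : Int) : Prop :=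
  1 ≤ r ∧ 0 ≤ s + d * (r * (r - 1) / 2) ∧ 0 ≤ s + d * (r * (r - 1) / 2) + d * (r - 1)
instance (s : Int) (d : Int) (r : Int) : Decidable (Pre_solve s d r) := by
  unfold Pre_solve; infer_instance
def pvWitness_solve : Int × Int × Int := (1, 1, 3)

def Spec_solve (s : Int) (d : Int) (r : Int) (out : Int) : Prop := out = solve_alt s d r
instance (s : Int) (d : Int) (r : Int) (out : Int) : Decidable (Spec_solve s d r out) := by
  unfold Spec_solve; infer_instance

-- ===== CLAIM (what is proved, stated in full; the proofs are below) =====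
def Claim_equal_solve : Prop :=
  ∀ (s : Int) (d : Int) (r : Int), Dom_solve s d r → Pre_solve s d r →
    Spec_solve s d r (solve s d r)

-- ===== LEMMAS AND PROOFS =====

-- triangle's closed form: on an all-None memo with enough fuel, T(r) = s + d*r*(r-1)/2
theorem pyTriangle_closed (s d : Int) :
    ∀ (fuel : Nat) (r : Int) (memo : List (Option Int)),
      (∀ x ∈ memo, x = none) → 1 ≤ r → r ≤ (fuel : Int) →
      (pyTriangle s d r memo fuel).1 = s + d * (r * (r - 1) / 2) := by
  intro fuel
  induction fuel with
  | zero => intro r memo _ h1 h2; omega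
  | succ fuel ih =>
      intro r memo hmemo h1 h2
      unfold pyTriangle
      have hget : ∀ v : Int, PySem.List.pyGet? memo r ≠ some (some v) := by
        intro v hv
        have := hmemo _ (PySem.List.mem_of_pyGet?_eq_some _ hv)
        simp at this
      rcases hx : PySem.List.pyGet? memo r with _ | x
      · simp only
        split
        · rename_i h1; subst h1; norm_num
        · rename_i hr1
          have hr2 : 2 ≤ r := by omega
          have := ih (r - 1) memo hmemo (by omega) (by omega)
          simp only [this]
          have hdiv : r * (r - 1) / 2 = (r - 1) * (r - 2) / 2 + (r - 1) := by
            have : r * (r - 1) = (r - 1) * (r - 2) + (r - 1) * 2 := by ring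
            rw [this, Int.add_mul_ediv_right _ _ (by norm_num)]
          rw [hdiv]; ring_nf
      · rcases x with _ | v
        · simp only
          split
          · rename_i h1; subst h1; norm_num
          · rename_i hr1
            have hr2 : 2 ≤ r := by omega
            have := ih (r - 1) memo hmemo (by omega) (by omega)
            simp only [this]
            have hdiv : r * (r - 1) / 2 = (r - 1) * (r - 2) / 2 + (r - 1) := by
              have : r * (r - 1) = (r - 1) * (r - 2) + (r - 1) * 2 := by ring
              rw [this, Int.add_mul_ediv_right _ _ (by norm_num)]
            rw [hdiv]; ring_nf
        · exact absurd hx (hget v)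

-- B's divmod loop computes A's octal-digit-list sum, for nonnegative n
theorem octSumLoopF_eq (f : Nat) :
    ∀ (n : Int), 0 ≤ n → n.toNat ≤ f →
      ∀ total, octSumLoopF f n total = total + (pyOctDigitsF f n).sum := by
  induction f with
  | zero =>
      intro n h0 hf total
      have hn : n = 0 := by omega
      subst hn
      simp [octSumLoopF, pyOctDigitsF]
  | succ f ih =>
      intro n h0 hf total
      have hfd : PySem.Int.floordiv n 8 = n / 8 :=
        PySem.Int.floordiv_eq_ediv_of_pos (by norm_num)
      have hmd : PySem.Int.mod n 8 = n % 8 :=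
        PySem.Int.mod_eq_emod_of_pos (by norm_num)
      rcases lt_or_ge n 8 with h8 | h8
      · rw [octSumLoopF, pyOctDigitsF, if_pos h8]
        split
        · rename_i hpos
          rw [hfd, hmd, ih (n / 8) (by omega) (by omega)]
          have h78 : n / 8 = 0 := by omega
          rw [h78]
          rcases f with _ | f <;> simp [pyOctDigitsF] <;> omega
        · simp; omega
      · rw [octSumLoopF, pyOctDigitsF, if_pos (show (0:Int) < n by omega),
            if_neg (show ¬ n < 8 by omega), hfd, hmd]
        rw [ih (n / 8) (by omega) (by omega)]
        simp; omega

theorem octSumLoop_eq (n : Int) (h0 : 0 ≤ n) (total : Int) :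
    octSumLoop n total = total + (pyOctDigits n).sum :=
  octSumLoopF_eq n.toNat n h0 le_rfl total

-- the two row loops agree when every row element is nonnegative
theorem loops_eq (d start : Int) :
    ∀ (k : Nat) (a b total : Int), b - a = (k : Int) →
      (∀ i, a ≤ i → i < b → 0 ≤ start + d * i) →
      ((PySem.List.pyRange a b 1).foldl
          (fun (st : Int × Int) _ => (st.1 + d, st.2 + (pyOctDigits st.1).sum))
          (start + d * a, total)).2
        = (PySem.List.pyRange a b 1).foldl
            (fun total i => octSumLoop (start + d * i) total) total := by
  intro k
  induction k with
  | zero =>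
      intro a b total hk _
      rw [PySem.List.pyRange_one_eq_nil (by omega)]
      simp
  | succ k ih =>
      intro a b total hk hnn
      rw [PySem.List.pyRange_one_cons (by omega)]
      simp only [List.foldl_cons]
      have h0 : 0 ≤ start + d * a := hnn a le_rfl (by omega)
      have hstep : start + d * a + d = start + d * (a + 1) := by ring
      rw [hstep, octSumLoop_eq _ h0]
      exact ih (a + 1) b (total + (pyOctDigits (start + d * a)).sum) (by omega)
        (fun i h1 h2 => hnn i (by omega) h2)

-- ===== VERDICT (by name: the statement is the Claim_ definition above) =====
theorem solve_spec : Claim_equal_solve := by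
  intro s d r _hdom hpre
  obtain ⟨hr, hlo, hhi⟩ := hpre
  unfold Spec_solve solve solve_alt
  simp only
  have hfd2 : PySem.Int.floordiv (r * (r - 1)) 2 = r * (r - 1) / 2 :=
    PySem.Int.floordiv_eq_ediv_of_pos (by norm_num)
  set start := s + d * (r * (r - 1) / 2) with hstart
  have hfirst : (pyTriangle s d r (List.replicate (r + 1).toNat none) r.toNat).1 = start := by
    apply pyTriangle_closed s d r.toNat r _ _ hr (by omega)
    intro x hx
    exact (List.eq_of_mem_replicate hx)
  rw [hfirst, hfd2, ← hstart]
  have hnn : ∀ i, (0:Int) ≤ i → i < r → 0 ≤ start + d * i := by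
    intro i h1 h2
    rcases le_or_gt 0 d with hd | hd
    · have : 0 ≤ d * i := mul_nonneg hd h1
      omega
    · have : d * (r - 1) ≤ d * i := by
        apply mul_le_mul_of_nonpos_left (by omega) (by omega)
      omega
  have := loops_eq d start r.toNat 0 r 0 (by omega) hnn
  rw [show start + d * 0 = start by ring] at this
  exact this
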